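-- pv_equiv track=rewrite | github.com/pypi-data/pypi-mirror-399 | packages/lifegrid/lifegrid-2.0.0-py3-none-any.whl/lifegrid/automata/lifelike.py | parse_bs
-- ===== SOURCE A (Python) =====
-- from typing import Iterable, Set, Tuple
--
-- def parse_bs(rule_str: str) -> Tuple[Set[int], Set[int]]:
--     """Parse B/S rule notation like 'B3/S23' into birth/survival sets."""
--     rule = rule_str.upper().replace(" ", "")
--     b_part: Set[int] = set()
--     s_part: Set[int] = set()
--
--     if "B" in rule:
--         try:
--             start = rule.index("B") + 1
--             end = rule.index("S") if "S" in rule else len(rule)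
--             segment = rule[start:end]
--             b_part = {int(ch) for ch in segment if ch.isdigit()}
--         except ValueError:
--             b_part = set()
--
--     if "S" in rule:
--         try:
--             start = rule.index("S") + 1
--             segment = rule[start:]
--             s_part = {int(ch) for ch in segment if ch.isdigit()}
--         except ValueError:
--             s_part = set()
--
--     return b_part, s_part
-- ===== SOURCE B (Python) =====
-- def parse_bs(rule_str):
--     """Parse B/S rule notation like 'B3/S23' into birth/survival sets."""
--     rule = rule_str.upper().replace(" ", "")
--     birth, survival = set(), set()
--     seen_b = seen_s = False
--     for ch in rule:
--         if ch == "B":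
--             seen_b = True
--         elif ch == "S":
--             seen_s = True
--         elif ch.isdigit():
--             if seen_s:
--                 survival.add(int(ch))
--             elif seen_b:
--                 birth.add(int(ch))
--     return birth, survival
-- ===== Notes on version B (the rewrite author's own statement) =====
-- stated objective: simpler
-- what changed: Replaces A's two index()/slice segment extractions with their per-segment set comprehensions and try/except by a single forward scan that classifies each digit using seen_b/seen_s flags.
import Mathlib
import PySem

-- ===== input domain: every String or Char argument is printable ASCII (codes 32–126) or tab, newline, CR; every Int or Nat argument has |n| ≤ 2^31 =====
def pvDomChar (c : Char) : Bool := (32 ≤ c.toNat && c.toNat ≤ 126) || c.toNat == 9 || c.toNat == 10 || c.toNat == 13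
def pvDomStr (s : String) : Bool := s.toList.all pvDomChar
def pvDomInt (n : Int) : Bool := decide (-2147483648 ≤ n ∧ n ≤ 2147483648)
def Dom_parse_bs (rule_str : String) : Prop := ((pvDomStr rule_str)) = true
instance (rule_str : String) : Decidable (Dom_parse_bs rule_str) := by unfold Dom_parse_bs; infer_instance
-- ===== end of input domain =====

-- B replaces A's two index()/slice segment extractions by a single forward scan with
-- seen_b/seen_s flags classifying each digit (simpler decomposition, same cost).


-- int(ch) for a single character; exact on Dom: on printable ASCII, ch.isdigit() holds only
-- for '0'..'9', where Python's int(ch) returns exactly this value and never raises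
-- (in particular A's `except ValueError` branches are unreachable on Dom).
def pvIntCh (ch : Char) : Int := (PySem.Int.ofChars? [ch]).getD 0

-- ===== PORT A =====
def parse_bs (rule_str : String) : List Int × List Int :=
  let rule := PySem.Str.replace (PySem.Str.upper rule_str) " " ""
  let b_part : PySem.Set Int := PySem.Set.empty
  let s_part : PySem.Set Int := PySem.Set.empty
  let b_part :=
    if PySem.Str.isIn "B" rule then
      let start := PySem.Str.find rule "B" + 1
      let stop := if PySem.Str.isIn "S" rule then PySem.Str.find rule "S" else PySem.Str.len rule
      let segment := PySem.Str.slice rule (some start) (some stop)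
      -- {int(ch) for ch in segment if ch.isdigit()}
      segment.toList.foldl
        (fun acc ch => if PySem.Chars.isdigit ch then PySem.Set.add acc (pvIntCh ch) else acc)
        PySem.Set.empty
    else b_part
  let s_part :=
    if PySem.Str.isIn "S" rule then
      let start := PySem.Str.find rule "S" + 1
      let segment := PySem.Str.slice rule (some start) none
      segment.toList.foldl
        (fun acc ch => if PySem.Chars.isdigit ch then PySem.Set.add acc (pvIntCh ch) else acc)
        PySem.Set.empty
    else s_part
  (b_part, s_part)

-- ===== PORT B =====
def parse_bs_alt (rule_str : String) : List Int × List Int :=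
  let rule := PySem.Str.replace (PySem.Str.upper rule_str) " " ""
  let st := rule.toList.foldl
    (fun (st : PySem.Set Int × PySem.Set Int × Bool × Bool) ch =>
      if ch = 'B' then (st.1, st.2.1, true, st.2.2.2)
      else if ch = 'S' then (st.1, st.2.1, st.2.2.1, true)
      else if PySem.Chars.isdigit ch then
        if st.2.2.2 then (st.1, PySem.Set.add st.2.1 (pvIntCh ch), st.2.2.1, st.2.2.2)
        else if st.2.2.1 then (PySem.Set.add st.1 (pvIntCh ch), st.2.1, st.2.2.1, st.2.2.2)
        else st
      else st)
    (PySem.Set.empty, PySem.Set.empty, false, false)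
  (st.1, st.2.1)

-- ===== PRECONDITION & SPEC =====
def Spec_parse_bs (rule_str : String) (out : List Int × List Int) : Prop := out = parse_bs_alt rule_str
instance (rule_str : String) (out : List Int × List Int) : Decidable (Spec_parse_bs rule_str out) := by unfold Spec_parse_bs; infer_instance

-- ===== CLAIM (what is proved, stated in full; the proofs are below) =====
def Claim_equal_parse_bs : Prop := ∀ (rule_str : String), Dom_parse_bs rule_str → Spec_parse_bs rule_str (parse_bs rule_str)

-- ===== LEMMAS AND PROOFS =====
-- proof-side helper definitions (used only below the claim block)
def pvQ (c : Char) : Bool := c != 'B' && c != 'S'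
def pvNS (c : Char) : Bool := c != 'S'

def pvDstep (acc : PySem.Set Int) (ch : Char) : PySem.Set Int :=
  if PySem.Chars.isdigit ch then PySem.Set.add acc (pvIntCh ch) else acc

def pvDfold (l : List Char) (s : PySem.Set Int) : PySem.Set Int := l.foldl pvDstep s

def pvBstep (st : PySem.Set Int × PySem.Set Int × Bool × Bool) (ch : Char) :
    PySem.Set Int × PySem.Set Int × Bool × Bool :=
  if ch = 'B' then (st.1, st.2.1, true, st.2.2.2)
  else if ch = 'S' then (st.1, st.2.1, st.2.2.1, true)
  else if PySem.Chars.isdigit ch then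
    if st.2.2.2 then (st.1, PySem.Set.add st.2.1 (pvIntCh ch), st.2.2.1, st.2.2.2)
    else if st.2.2.1 then (PySem.Set.add st.1 (pvIntCh ch), st.2.1, st.2.2.1, st.2.2.2)
    else st
  else st

def pvBres (l : List Char) : List Int × List Int :=
  match l.dropWhile pvQ with
  | [] => ([], [])
  | c :: t =>
    if c = 'B' then (pvDfold (t.takeWhile pvNS) [], pvDfold ((t.dropWhile pvNS).drop 1) [])
    else ([], pvDfold t [])

def pvAres (l : List Char) : List Int × List Int :=
  ((if PySem.Chars.isIn ['B'] l then
      pvDfold (PySem.List.slice l (some (PySem.Chars.find l ['B'] + 1))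
        (some (if PySem.Chars.isIn ['S'] l then PySem.Chars.find l ['S'] else (l.length : Int)))) []
    else []),
   (if PySem.Chars.isIn ['S'] l then
      pvDfold (PySem.List.slice l (some (PySem.Chars.find l ['S'] + 1)) none) []
    else []))

lemma pvIsdigit_B : PySem.Chars.isdigit 'B' = false := rfl
lemma pvIsdigit_S : PySem.Chars.isdigit 'S' = false := rfl

set_option maxHeartbeats 1000000 in
lemma pv_a_eq (s : String) :
    parse_bs s = pvAres ((PySem.Str.replace (PySem.Str.upper s) " " "").toList) := by
  simp only [parse_bs, pvAres, pvDfold, PySem.Str.isIn_eq, PySem.Str.find_eq,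
    PySem.Str.toList_slice, PySem.Str.len_eq, PySem.Chars.slice_eq_listSlice]
  rfl

lemma pv_alt_eq (s : String) :
    parse_bs_alt s =
      (((PySem.Str.replace (PySem.Str.upper s) " " "").toList.foldl pvBstep
          (PySem.Set.empty, PySem.Set.empty, false, false)).1,
       ((PySem.Str.replace (PySem.Str.upper s) " " "").toList.foldl pvBstep
          (PySem.Set.empty, PySem.Set.empty, false, false)).2.1) := by
  have h : (fun (st : PySem.Set Int × PySem.Set Int × Bool × Bool) ch =>
      if ch = 'B' then (st.1, st.2.1, true, st.2.2.2)
      else if ch = 'S' then (st.1, st.2.1, st.2.2.1, true)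
      else if PySem.Chars.isdigit ch then
        if st.2.2.2 then (st.1, PySem.Set.add st.2.1 (pvIntCh ch), st.2.2.1, st.2.2.2)
        else if st.2.2.1 then (PySem.Set.add st.1 (pvIntCh ch), st.2.1, st.2.2.1, st.2.2.2)
        else st
      else st) = pvBstep := rfl
  simp only [parse_bs_alt, h]

lemma pv_fold_ss : ∀ (l : List Char) (bs ss : PySem.Set Int) (sb : Bool),
    ((l.foldl pvBstep (bs, ss, sb, true)).1, (l.foldl pvBstep (bs, ss, sb, true)).2.1)
      = (bs, pvDfold l ss) := by
  intro l
  induction l with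
  | nil => intro bs ss sb; rfl
  | cons c t ih =>
    intro bs ss sb
    by_cases hB : c = 'B'
    · subst hB
      simpa [pvBstep, pvDfold, pvDstep, pvIsdigit_B] using ih bs ss true
    · by_cases hS : c = 'S'
      · subst hS
        simpa [pvBstep, pvDfold, pvDstep, pvIsdigit_S] using ih bs ss sb
      · by_cases hd : PySem.Chars.isdigit c
        · simpa [pvBstep, pvDfold, pvDstep, hB, hS, hd] using
            ih bs (PySem.Set.add ss (pvIntCh c)) sb
        · simpa [pvBstep, pvDfold, pvDstep, hB, hS, hd] using ih bs ss sb

lemma pv_fold_sb : ∀ (l : List Char) (bs ss : PySem.Set Int),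
    ((l.foldl pvBstep (bs, ss, true, false)).1, (l.foldl pvBstep (bs, ss, true, false)).2.1)
      = (pvDfold (l.takeWhile pvNS) bs, pvDfold ((l.dropWhile pvNS).drop 1) ss) := by
  intro l
  induction l with
  | nil => intro bs ss; rfl
  | cons c t ih =>
    intro bs ss
    by_cases hS : c = 'S'
    · subst hS
      simpa [pvBstep, pvNS, pvDfold, pvDstep, pvIsdigit_S] using pv_fold_ss t bs ss true
    · have hNS : pvNS c = true := by simp [pvNS, hS]
      by_cases hB : c = 'B'
      · subst hB
        simpa [pvBstep, pvNS, pvDfold, pvDstep, pvIsdigit_B] using ih bs ss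
      · by_cases hd : PySem.Chars.isdigit c
        · simpa [pvBstep, pvNS, hB, hS, hd, pvDfold, pvDstep] using
            ih (PySem.Set.add bs (pvIntCh c)) ss
        · simpa [pvBstep, pvNS, hB, hS, hd, pvDfold, pvDstep] using ih bs ss

lemma pv_fold_init : ∀ (l : List Char) (bs ss : PySem.Set Int),
    ((l.foldl pvBstep (bs, ss, false, false)).1, (l.foldl pvBstep (bs, ss, false, false)).2.1)
      = (match l.dropWhile pvQ with
         | [] => (bs, ss)
         | c :: t =>
           if c = 'B' then (pvDfold (t.takeWhile pvNS) bs, pvDfold ((t.dropWhile pvNS).drop 1) ss)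
           else (bs, pvDfold t ss)) := by
  intro l
  induction l with
  | nil => intro bs ss; rfl
  | cons c t ih =>
    intro bs ss
    by_cases hB : c = 'B'
    · subst hB
      simpa [pvBstep, pvQ, List.dropWhile_cons] using pv_fold_sb t bs ss
    · by_cases hS : c = 'S'
      · subst hS
        simpa [pvBstep, pvQ, List.dropWhile_cons] using pv_fold_ss t bs ss false
      · have hQ : pvQ c = true := by simp [pvQ, hB, hS]
        by_cases hd : PySem.Chars.isdigit c
        · simpa [pvBstep, hB, hS, hd, List.dropWhile_cons, hQ] using ih bs ss
        · simpa [pvBstep, hB, hS, hd, List.dropWhile_cons, hQ] using ih bs ss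

lemma pv_isIn_single_true {c : Char} {l : List Char} (h : c ∈ l) :
    PySem.Chars.isIn [c] l = true :=
  (PySem.Chars.isIn_iff_infix _ _).mpr ((List.singleton_infix_iff c l).mpr h)

lemma pv_isIn_single_false {c : Char} {l : List Char} (h : c ∉ l) :
    PySem.Chars.isIn [c] l = false :=
  (PySem.Chars.isIn_eq_false_iff _ _).mpr fun hi => h ((List.singleton_infix_iff c l).mp hi)

lemma pvTW_len (c : Char) : ∀ (n : Nat) (l : List Char),
    [c] <+: l.drop n → (∀ i < n, ¬ [c] <+: l.drop i) →
    (l.takeWhile (fun x => x != c)).length = n := by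
  intro n
  induction n with
  | zero =>
    intro l h _
    cases l with
    | nil => simp at h
    | cons a t =>
      simp only [List.drop_zero] at h
      obtain ⟨ha, -⟩ := (List.cons_prefix_cons).mp h
      subst ha
      simp
  | succ n ih =>
    intro l h hmin
    cases l with
    | nil => simp at h
    | cons a t =>
      have ha : a ≠ c := by
        intro he
        exact hmin 0 (Nat.succ_pos n) (by subst he; exact ⟨t, rfl⟩)
      have h' : [c] <+: t.drop n := by simpa using h
      have hmin' : ∀ i < n, ¬ [c] <+: t.drop i := by
        intro i hi
        have := hmin (i + 1) (by omega)
        simpa using this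
      have hne : (a != c) = true := by simp [ha]
      simp [hne, ih t h' hmin']

lemma pvFind_single {c : Char} {l : List Char} (h : c ∈ l) :
    PySem.Chars.find l [c] = ((l.takeWhile (fun x => x != c)).length : Int) := by
  have hin : [c] <:+: l := (List.singleton_infix_iff c l).mpr h
  have h0 : 0 ≤ PySem.Chars.find l [c] := (PySem.Chars.find_nonneg_iff l [c]).mpr hin
  obtain ⟨h1, h2⟩ := PySem.Chars.find_spec h0
  rw [pvTW_len c (PySem.Chars.find l [c]).toNat l h1 h2, Int.toNat_of_nonneg h0]

lemma pvDW_head {p : Char → Bool} : ∀ {l t : List Char} {c : Char},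
    l.dropWhile p = c :: t → p c = false := by
  intro l
  induction l with
  | nil => intro t c h; simp at h
  | cons a s ih =>
    intro t c h
    by_cases ha : p a
    · rw [List.dropWhile_cons_of_pos ha] at h; exact ih h
    · rw [List.dropWhile_cons_of_neg ha] at h
      injection h with h1 h2
      subst h1
      simpa using ha

lemma pvDropPre (a : List Char) (c : Char) (t : List Char) :
    (a ++ c :: t).drop (a.length + 1) = t := by
  rw [show a ++ c :: t = (a ++ [c]) ++ t by simp]
  have : (a ++ [c]).length = a.length + 1 := by simp
  rw [← this, List.drop_left]

lemma pvTake_takeWhile (l : List Char) (p : Char → Bool) :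
    l.take ((l.takeWhile p).length) = l.takeWhile p :=
  ((List.prefix_iff_eq_take).mp (List.takeWhile_prefix p)).symm

lemma pvDrop_takeWhile : ∀ (l : List Char) (p : Char → Bool),
    l.drop ((l.takeWhile p).length) = l.dropWhile p := by
  intro l p
  induction l with
  | nil => rfl
  | cons a t ih =>
    by_cases h : p a
    · simp [h, ih]
    · simp [h]

lemma pv_ares_eq_bres : ∀ (l : List Char), pvAres l = pvBres l := by
  intro l
  have hsplit : l.takeWhile pvQ ++ l.dropWhile pvQ = l := List.takeWhile_append_dropWhile
  have hpreQ : ∀ c ∈ l.takeWhile pvQ, pvQ c = true := fun c h => List.mem_takeWhile_imp h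
  cases hr : l.dropWhile pvQ with
  | nil =>
    have hB : 'B' ∉ l := by
      intro h
      have hh : 'B' ∈ l.takeWhile pvQ := by rw [← hsplit, hr, List.append_nil] at h; exact h
      have := hpreQ _ hh
      simp [pvQ] at this
    have hS : 'S' ∉ l := by
      intro h
      have hh : 'S' ∈ l.takeWhile pvQ := by rw [← hsplit, hr, List.append_nil] at h; exact h
      have := hpreQ _ hh
      simp [pvQ] at this
    simp [pvAres, pvBres, hr, pv_isIn_single_false hB, pv_isIn_single_false hS]
  | cons c t =>
    have hl : l = l.takeWhile pvQ ++ c :: t := by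
      conv_lhs => rw [← hsplit]
      rw [hr]
    have hcQ : pvQ c = false := pvDW_head hr
    have hcBS : c = 'B' ∨ c = 'S' := by
      by_cases hB : c = 'B'
      · exact Or.inl hB
      · by_cases hS : c = 'S'
        · exact Or.inr hS
        · exfalso; simp [pvQ, hB, hS] at hcQ
    obtain ⟨P, hPQ, hPd, rfl⟩ :
        ∃ P, (∀ x ∈ P, pvQ x = true) ∧ (P ++ c :: t).dropWhile pvQ = c :: t ∧ l = P ++ c :: t :=
      ⟨l.takeWhile pvQ, hpreQ, by rw [← hl]; exact hr, hl⟩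
    have hpreB : ∀ x ∈ P, (x != 'B') = true := by
      intro x hx
      have := hPQ x hx
      simp [pvQ] at this
      simp [this.1]
    have hpreS : ∀ x ∈ P, (x != 'S') = true := by
      intro x hx
      have := hPQ x hx
      simp [pvQ] at this
      simp [this.2]
    rcases hcBS with rfl | rfl
    · -- first non-pre character is 'B'
      have hBmem : 'B' ∈ P ++ 'B' :: t := by simp
      have htwB : (P ++ 'B' :: t).takeWhile (fun x => x != 'B') = P := by
        rw [List.takeWhile_append_of_pos hpreB]
        simp
      have hfindB : PySem.Chars.find (P ++ 'B' :: t) ['B'] = (P.length : Int) := by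
        rw [pvFind_single hBmem, htwB]
      have hdropP1 : (P ++ 'B' :: t).drop (P.length + 1) = t := pvDropPre P 'B' t
      by_cases hSt : 'S' ∈ t
      · have hSmem : 'S' ∈ P ++ 'B' :: t := by simp [hSt]
        have htwS : (P ++ 'B' :: t).takeWhile (fun x => x != 'S')
            = P ++ 'B' :: t.takeWhile pvNS := by
          rw [List.takeWhile_append_of_pos hpreS]
          simp
          rfl
        have hfindS : PySem.Chars.find (P ++ 'B' :: t) ['S']
            = ((P.length + 1 + (t.takeWhile pvNS).length : Nat) : Int) := by
          rw [pvFind_single hSmem, htwS]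
          simp only [List.length_append, List.length_cons]
          omega
        have hslice1 : PySem.List.slice (P ++ 'B' :: t) (some ((P.length : Int) + 1))
            (some ((P.length + 1 + (t.takeWhile pvNS).length : Nat) : Int))
            = t.takeWhile pvNS := by
          rw [show ((P.length : Int) + 1) = ((P.length + 1 : Nat) : Int) by push_cast; ring]
          rw [PySem.List.slice_toNat _ (Int.natCast_nonneg _) (Int.natCast_nonneg _)]
          simp only [Int.toNat_natCast]
          rw [hdropP1, show P.length + 1 + (t.takeWhile pvNS).length - (P.length + 1)
              = (t.takeWhile pvNS).length by omega]
          exact pvTake_takeWhile t pvNS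
        have hslice2 : PySem.List.slice (P ++ 'B' :: t)
            (some (((P.length + 1 + (t.takeWhile pvNS).length : Nat) : Int) + 1)) none
            = (t.dropWhile pvNS).drop 1 := by
          rw [show (((P.length + 1 + (t.takeWhile pvNS).length : Nat) : Int) + 1)
              = ((P.length + 1 + (t.takeWhile pvNS).length + 1 : Nat) : Int) by push_cast; ring]
          rw [PySem.List.slice_from _ (Int.natCast_nonneg _)]
          simp only [Int.toNat_natCast]
          have h1 := congrArg (List.drop ((t.takeWhile pvNS).length + 1)) hdropP1
          rw [List.drop_drop] at h1
          rw [show P.length + 1 + (t.takeWhile pvNS).length + 1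
              = P.length + 1 + ((t.takeWhile pvNS).length + 1) by omega, h1,
            ← pvDrop_takeWhile t pvNS, List.drop_drop]
        simp only [pvAres, pvBres, hPd, pv_isIn_single_true hBmem, pv_isIn_single_true hSmem,
          if_true, hfindB, hfindS, hslice1, hslice2]
      · have hSl : 'S' ∉ P ++ 'B' :: t := by
          intro h
          rcases List.mem_append.mp h with h | h
          · have := hpreS _ h; simp at this
          · rcases List.mem_cons.mp h with h | h
            · exact absurd h.symm (by decide)
            · exact hSt h
        have hslice1 : PySem.List.slice (P ++ 'B' :: t) (some ((P.length : Int) + 1))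
            (some (((P ++ 'B' :: t).length : Int))) = t := by
          rw [show ((P.length : Int) + 1) = ((P.length + 1 : Nat) : Int) by push_cast; ring]
          rw [PySem.List.slice_toNat _ (Int.natCast_nonneg _) (Int.natCast_nonneg _)]
          simp only [Int.toNat_natCast]
          rw [hdropP1, show (P ++ 'B' :: t).length - (P.length + 1) = t.length by
            simp only [List.length_append, List.length_cons]; omega]
          exact List.take_length ..
        have htNS : ∀ x ∈ t, pvNS x = true := by
          intro x hx
          have hxne : x ≠ 'S' := fun he => hSt (he ▸ hx)
          simp [pvNS, hxne]
        have htw : t.takeWhile pvNS = t := List.takeWhile_eq_self_iff.mpr htNS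
        have hdw : t.dropWhile pvNS = [] := List.dropWhile_eq_nil_iff.mpr htNS
        simp only [pvAres, pvBres, hPd, pv_isIn_single_true hBmem, pv_isIn_single_false hSl,
          if_true, Bool.false_eq_true, if_false, hfindB, hslice1, htw, hdw]
        simp [pvDfold]
    · -- first non-pre character is 'S'
      have hSmem : 'S' ∈ P ++ 'S' :: t := by simp
      have htwS : (P ++ 'S' :: t).takeWhile (fun x => x != 'S') = P := by
        rw [List.takeWhile_append_of_pos hpreS]
        simp
      have hfindS : PySem.Chars.find (P ++ 'S' :: t) ['S'] = (P.length : Int) := by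
        rw [pvFind_single hSmem, htwS]
      have hdropP1 : (P ++ 'S' :: t).drop (P.length + 1) = t := pvDropPre P 'S' t
      have hslice2 : PySem.List.slice (P ++ 'S' :: t) (some ((P.length : Int) + 1)) none
          = t := by
        rw [show ((P.length : Int) + 1) = ((P.length + 1 : Nat) : Int) by push_cast; ring]
        rw [PySem.List.slice_from _ (Int.natCast_nonneg _)]
        simp only [Int.toNat_natCast]
        exact hdropP1
      have hbirth : (pvAres (P ++ 'S' :: t)).1 = [] := by
        by_cases hBl : 'B' ∈ P ++ 'S' :: t
        · have hfindB := pvFind_single hBl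
          simp only [pvAres, pv_isIn_single_true hBl, pv_isIn_single_true hSmem, if_true,
            hfindB, hfindS]
          rw [show ((((P ++ 'S' :: t).takeWhile (fun x => x != 'B')).length : Int) + 1)
              = ((((P ++ 'S' :: t).takeWhile (fun x => x != 'B')).length + 1 : Nat) : Int) by
            push_cast; ring]
          rw [PySem.List.slice_toNat _ (Int.natCast_nonneg _) (Int.natCast_nonneg _)]
          have hge : P.length ≤ ((P ++ 'S' :: t).takeWhile (fun x => x != 'B')).length := by
            have hh : (P ++ 'S' :: t).takeWhile (fun x => x != 'B')
                = P ++ ('S' :: t).takeWhile (fun x => x != 'B') :=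
              List.takeWhile_append_of_pos hpreB
            simp [hh]
          simp only [Int.toNat_natCast]
          rw [show P.length - (((P ++ 'S' :: t).takeWhile (fun x => x != 'B')).length + 1)
              = 0 by omega]
          simp [pvDfold]
        · simp [pvAres, pv_isIn_single_false hBl]
      have hsurv : (pvAres (P ++ 'S' :: t)).2 = pvDfold t [] := by
        simp only [pvAres, pv_isIn_single_true hSmem, if_true, hfindS, hslice2]
      have hb : pvBres (P ++ 'S' :: t) = ([], pvDfold t []) := by
        simp [pvBres, hPd]
      rw [hb]
      rw [Prod.ext_iff]
      exact ⟨hbirth, hsurv⟩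

lemma pv_fold_init_empty (l : List Char) :
    ((l.foldl pvBstep (PySem.Set.empty, PySem.Set.empty, false, false)).1,
     (l.foldl pvBstep (PySem.Set.empty, PySem.Set.empty, false, false)).2.1) = pvBres l := by
  rw [pv_fold_init]
  unfold pvBres
  cases l.dropWhile pvQ with
  | nil => rfl
  | cons c t => rfl

-- ===== VERDICT (by name: the statement is the Claim_ definition above) =====
theorem parse_bs_spec : Claim_equal_parse_bs := by
  intro s _
  show parse_bs s = parse_bs_alt s
  rw [pv_a_eq, pv_ares_eq_bres, pv_alt_eq, pv_fold_init_empty]
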